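-- pv_equiv track=rewrite | github.com/H3rm1nat0r/genius | validate_VAT_ID.py | _is_valid_dutch_vat_checksum
-- ===== SOURCE A (Python) =====
-- def _is_valid_dutch_vat_checksum(number: str) -> bool:
--     if not number.endswith("B01") and not number.endswith("B02"):
--         return True  # Only check for standard formats
--
--     digits = number[:9]
--     if not digits.isdigit():
--         return False
--
--     weights = list(range(9, 0, -1))
--     total = sum(int(d) * w for d, w in zip(digits, weights))
--     return total % 11 == 0
-- ===== SOURCE B (Python) =====
-- def _is_valid_dutch_vat_checksum(number: str) -> bool:
--     if number.endswith(("B01", "B02")):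
--         digits = number[:9]
--         if digits.isdigit():
--             running = 0
--             total = 0
--             for d in digits:
--                 running += int(d)
--                 total += running
--             return total % 11 == 0
--         return False
--     return True
-- ===== Notes on version B (the rewrite author's own statement) =====
-- stated objective: alternative
-- what changed: Replaced the precomputed weights list (range(9,0,-1)) zipped into a dot product by a single prefix-sum accumulation: running prefix sums are added into the total, which yields the same weighted checksum because weight 9-i equals the number of prefixes digit i belongs to.
import Mathlib
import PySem

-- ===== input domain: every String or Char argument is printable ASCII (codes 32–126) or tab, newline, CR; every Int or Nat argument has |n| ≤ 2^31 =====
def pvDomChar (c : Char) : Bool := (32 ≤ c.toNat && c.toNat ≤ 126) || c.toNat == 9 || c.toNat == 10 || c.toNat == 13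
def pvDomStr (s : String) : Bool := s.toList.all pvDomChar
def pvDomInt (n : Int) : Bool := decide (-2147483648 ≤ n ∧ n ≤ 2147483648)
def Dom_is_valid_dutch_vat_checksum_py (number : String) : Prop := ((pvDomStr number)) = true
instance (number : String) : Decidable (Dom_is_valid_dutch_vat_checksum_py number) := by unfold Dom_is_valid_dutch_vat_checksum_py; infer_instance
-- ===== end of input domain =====

-- B replaces A's weights-list + zip dot product by a single prefix-sum accumulation (alternative decomposition, same cost).

-- int(d) for a one-character string d; A and B only apply it to digit characters (guarded by isdigit)
def pvIntChar (d : Char) : Int := (PySem.Int.ofChars? [d]).getD 0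

-- ===== PORT A =====
def is_valid_dutch_vat_checksum_py (number : String) : Bool :=
  if !(PySem.Str.endswith number "B01") && !(PySem.Str.endswith number "B02") then
    true
  else
    let digits := PySem.List.slice number.toList none (some 9)
    if !(PySem.Chars.strIsdigit digits) then
      false
    else
      let weights := PySem.List.pyRange 9 0 (-1)
      let total := ((digits.zip weights).map (fun p => pvIntChar p.1 * p.2)).sum
      PySem.Int.mod total 11 == 0

-- ===== PORT B =====
def is_valid_dutch_vat_checksum_py_alt (number : String) : Bool :=
  if PySem.Str.endswith number "B01" || PySem.Str.endswith number "B02" then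
    let digits := PySem.List.slice number.toList none (some 9)
    if PySem.Chars.strIsdigit digits then
      let st := digits.foldl (fun (s : Int × Int) d =>
        let running := s.1 + pvIntChar d
        (running, s.2 + running)) (0, 0)
      PySem.Int.mod st.2 11 == 0
    else
      false
  else
    true

-- ===== PRECONDITION & SPEC =====
def Spec_is_valid_dutch_vat_checksum_py (number : String) (out : Bool) : Prop := out = is_valid_dutch_vat_checksum_py_alt number
instance (number : String) (out : Bool) : Decidable (Spec_is_valid_dutch_vat_checksum_py number out) := by unfold Spec_is_valid_dutch_vat_checksum_py; infer_instance

-- ===== CLAIM (what is proved, stated in full; the proofs are below) =====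
def Claim_equal_is_valid_dutch_vat_checksum_py : Prop := ∀ (number : String), Dom_is_valid_dutch_vat_checksum_py number → Spec_is_valid_dutch_vat_checksum_py number (is_valid_dutch_vat_checksum_py number)

-- ===== LEMMAS AND PROOFS =====

-- If number ends with "B01" or "B02" and number[:9] is all digits, the string has at least 9 chars,
-- so the slice has exactly 9 characters.
lemma pv_len_nine (number : String)
    (hend : PySem.Str.endswith number "B01" = true ∨ PySem.Str.endswith number "B02" = true)
    (hdig : PySem.Chars.strIsdigit (PySem.List.slice number.toList none (some 9)) = true) :
    (PySem.List.slice number.toList none (some 9)).length = 9 := by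
  have hs : PySem.List.slice number.toList none (some 9) = number.toList.take 9 := by
    simpa using PySem.List.slice_to number.toList (b := 9) (by norm_num)
  rw [hs]
  rw [hs] at hdig
  have hlen : 9 ≤ number.toList.length := by
    by_contra hlt
    have htake : number.toList.take 9 = number.toList := List.take_of_length_le (by omega)
    rw [htake] at hdig
    have hB : ('B' : Char) ∈ number.toList := by
      rcases hend with he | he <;>
      · have h' : PySem.Chars.endswith number.toList _ = true := PySem.Str.endswith_eq number _ ▸ he
        have hsuf := (PySem.Chars.endswith_iff _ _).mp h'
        exact hsuf.mem (by decide)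
    simp [PySem.Chars.strIsdigit, List.all_eq_true] at hdig
    have := hdig.2 _ hB
    simp [PySem.Chars.isdigit] at this
  rw [List.length_take]
  omega

-- For a 9-element list, the zip-with-weights sum equals the prefix-sum fold's total.
lemma pv_nine_eq (digits : List Char) (h9 : digits.length = 9) :
    ((digits.zip (PySem.List.pyRange 9 0 (-1))).map (fun p => pvIntChar p.1 * p.2)).sum
      = (digits.foldl (fun (s : Int × Int) d =>
          let running := s.1 + pvIntChar d
          (running, s.2 + running)) (0, 0)).2 := by
  have hr : PySem.List.pyRange 9 0 (-1) = [9, 8, 7, 6, 5, 4, 3, 2, 1] := by decide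
  rcases digits with _|⟨a, _|⟨b, _|⟨c, _|⟨d, _|⟨e, _|⟨f, _|⟨g, _|⟨h, _|⟨i, tl⟩⟩⟩⟩⟩⟩⟩⟩⟩ <;>
    simp only [List.length_cons, List.length_nil] at h9 <;> try omega
  have htl : tl = [] := by
    have : tl.length = 0 := by omega
    simpa [List.length_eq_zero_iff] using this
  subst htl
  simp [hr, List.zip, List.zipWith, List.foldl]
  ring

-- ===== VERDICT (by name: the statement is the Claim_ definition above) =====
theorem is_valid_dutch_vat_checksum_py_spec : Claim_equal_is_valid_dutch_vat_checksum_py := by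
  intro number _
  unfold Spec_is_valid_dutch_vat_checksum_py is_valid_dutch_vat_checksum_py is_valid_dutch_vat_checksum_py_alt
  by_cases h1 : PySem.Str.endswith number "B01" = true <;>
  by_cases h2 : PySem.Str.endswith number "B02" = true <;>
  simp only [h1, h2, Bool.not_true, Bool.not_false, Bool.false_and, Bool.and_self,
    Bool.and_false, Bool.or_true, Bool.or_false, if_true] <;>
  first
  | rfl
  | · by_cases hd : PySem.Chars.strIsdigit (PySem.List.slice number.toList none (some 9)) = true
      · simp only [hd, Bool.not_true]
        rw [pv_nine_eq _ (pv_len_nine number (by tauto) hd)]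
        simp
      · simp [hd]
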